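-- pv_equiv track=rewrite | github.com/OthmaneBlial/lightclaw | core/bot/delegation/workspace.py | _summarize_workspace_delta
-- ===== SOURCE A (Python) =====
-- def _summarize_workspace_delta(
--     before: dict[str, tuple[int, int]],
--     after: dict[str, tuple[int, int]],
--     max_items_per_group: int = 12,
-- ) -> str:
--     before_paths = set(before.keys())
--     after_paths = set(after.keys())
--
--     created = sorted(after_paths - before_paths)
--     deleted = sorted(before_paths - after_paths)
--     updated = sorted(
--         path for path in (before_paths & after_paths) if before[path] != after[path]
--     )
--
--     total = len(created) + len(updated) + len(deleted)
--     if total == 0: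
--         return "No workspace file changes detected."
--
--     lines = [
--         "✅ Workspace changes detected:",
--         f"- Created: {len(created)}",
--         f"- Updated: {len(updated)}",
--         f"- Deleted: {len(deleted)}",
--     ]
--
--     for label, items in (("Created", created), ("Updated", updated), ("Deleted", deleted)):
--         if not items:
--             continue
--         for path in items[:max_items_per_group]:
--             lines.append(f"- {label}: `{path}`")
--         remaining = len(items) - max_items_per_group
--         if remaining > 0:
--             lines.append(f"- {label}: ... and {remaining} more")
--
--     return "\n".join(lines)
-- ===== SOURCE B (Python) =====
-- def _summarize_workspace_delta(
--     before: dict[str, tuple[int, int]],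
--     after: dict[str, tuple[int, int]],
--     max_items_per_group: int = 12,
-- ) -> str:
--     # Two-pointer merge of the two key-sorted item lists: classification lists
--     # come out already sorted, no set algebra and no per-group sorting needed.
--     bs = sorted(before.items(), key=lambda kv: kv[0])
--     asr = sorted(after.items(), key=lambda kv: kv[0])
--     created, updated, deleted = [], [], []
--     i = j = 0
--     while i < len(bs) and j < len(asr):
--         kb, vb = bs[i]
--         ka, va = asr[j]
--         if kb < ka:
--             deleted.append(kb)
--             i += 1
--         elif ka < kb:
--             created.append(ka)
--             j += 1
--         else:
--             if vb != va:
--                 updated.append(kb)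
--             i += 1
--             j += 1
--     deleted.extend(k for k, _ in bs[i:])
--     created.extend(k for k, _ in asr[j:])
--
--     if not (created or updated or deleted):
--         return "No workspace file changes detected."
--
--     lines = [
--         "✅ Workspace changes detected:",
--         f"- Created: {len(created)}",
--         f"- Updated: {len(updated)}",
--         f"- Deleted: {len(deleted)}",
--     ]
--     for label, items in (("Created", created), ("Updated", updated), ("Deleted", deleted)):
--         lines.extend(_group_lines(label, items, max_items_per_group))
--     return "\n".join(lines)
--
--
-- def _group_lines(label, items, cap):
--     if not items:
--         return []
--     out = [f"- {label}: `{p}`" for p in items[:cap]]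
--     remaining = len(items) - cap
--     if remaining > 0:
--         out.append(f"- {label}: ... and {remaining} more")
--     return out
-- ===== Notes on version B (the rewrite author's own statement) =====
-- stated objective: alternative
-- what changed: Replaces A's set algebra (two set differences, one intersection, three sorts of the results) with a two-pointer merge of the two key-sorted item lists that emits created/updated/deleted already in sorted order, and renders groups via a helper returning each group's lines instead of appending inside the loop.
import Mathlib
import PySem

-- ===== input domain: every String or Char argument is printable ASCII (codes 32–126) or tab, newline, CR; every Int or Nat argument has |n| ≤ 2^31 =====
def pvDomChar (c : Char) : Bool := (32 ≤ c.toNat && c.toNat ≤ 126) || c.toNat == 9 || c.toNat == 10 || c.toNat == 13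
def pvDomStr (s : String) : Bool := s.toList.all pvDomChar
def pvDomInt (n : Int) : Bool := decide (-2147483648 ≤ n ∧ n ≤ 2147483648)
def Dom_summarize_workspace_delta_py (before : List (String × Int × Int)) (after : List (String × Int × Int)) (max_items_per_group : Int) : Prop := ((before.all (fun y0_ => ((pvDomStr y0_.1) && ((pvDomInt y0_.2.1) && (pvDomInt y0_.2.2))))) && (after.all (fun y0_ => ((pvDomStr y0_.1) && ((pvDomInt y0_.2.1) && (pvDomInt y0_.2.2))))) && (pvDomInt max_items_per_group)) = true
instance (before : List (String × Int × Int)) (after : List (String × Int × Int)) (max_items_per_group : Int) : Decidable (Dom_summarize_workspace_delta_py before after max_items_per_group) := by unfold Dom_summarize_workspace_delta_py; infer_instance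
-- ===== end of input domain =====

-- B replaces A's set algebra (two set differences, an intersection, three sorts) with a two-pointer
-- merge of the two key-sorted item lists, which emits created/updated/deleted already sorted.

-- ===== PORT A =====
-- per-group formatting of A: for path in items[:max]: append "- {label}: `{path}`"; then the "... and N more" line
def pvFmtGroup (label : String) (items : List String) (max_items : Int) (lines : List String) : List String :=
  if items = [] then lines
  else
    let lines := lines ++ (PySem.List.slice items none (some max_items)).map
      (fun path => "- " ++ label ++ ": `" ++ path ++ "`")
    let remaining : Int := PySem.List.len items - max_items
    if remaining > 0 then lines ++ ["- " ++ label ++ ": ... and " ++ PySem.Int.toStr remaining ++ " more"]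
    else lines

def summarize_workspace_delta_py (before : List (String × Int × Int)) (after : List (String × Int × Int)) (max_items_per_group : Int) : String :=
  let b := PySem.Dict.ofList before
  let a := PySem.Dict.ofList after
  let before_paths : PySem.Set String := PySem.Set.ofList b.keys
  let after_paths : PySem.Set String := PySem.Set.ofList a.keys
  let created := PySem.List.sorted (PySem.Set.diff after_paths before_paths) (fun x => x) false
  let deleted := PySem.List.sorted (PySem.Set.diff before_paths after_paths) (fun x => x) false
  let updated := PySem.List.sorted
    ((PySem.Set.inter before_paths after_paths).filter (fun path => b.get? path != a.get? path))
    (fun x => x) false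
  let total := created.length + updated.length + deleted.length
  if total = 0 then "No workspace file changes detected."
  else
    let lines : List String :=
      ["✅ Workspace changes detected:",
       "- Created: " ++ PySem.Int.toStr (created.length : Int),
       "- Updated: " ++ PySem.Int.toStr (updated.length : Int),
       "- Deleted: " ++ PySem.Int.toStr (deleted.length : Int)]
    let lines := pvFmtGroup "Created" created max_items_per_group lines
    let lines := pvFmtGroup "Updated" updated max_items_per_group lines
    let lines := pvFmtGroup "Deleted" deleted max_items_per_group lines
    PySem.Str.join "\n" lines

-- ===== PORT B =====
-- the while-loop over indices i, j plus the two trailing extends of Source B, as one recursion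
def pvMerge : List (String × Int × Int) → List (String × Int × Int) → List String × List String × List String
  | [], asr => (asr.map (fun p => p.1), [], [])
  | (kb, vb) :: bs, [] => ([], [], ((kb, vb) :: bs).map (fun p => p.1))
  | (kb, vb) :: bs, (ka, va) :: asr =>
    if kb < ka then
      let r := pvMerge bs ((ka, va) :: asr)
      (r.1, r.2.1, kb :: r.2.2)
    else if ka < kb then
      let r := pvMerge ((kb, vb) :: bs) asr
      (ka :: r.1, r.2.1, r.2.2)
    else
      let r := pvMerge bs asr
      (r.1, if vb != va then kb :: r.2.1 else r.2.1, r.2.2)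
termination_by bs asr => bs.length + asr.length

-- Source B's _group_lines helper
def pvGroupLines (label : String) (items : List String) (cap : Int) : List String :=
  if items = [] then []
  else
    let out := (PySem.List.slice items none (some cap)).map
      (fun p => "- " ++ label ++ ": `" ++ p ++ "`")
    let remaining : Int := PySem.List.len items - cap
    if remaining > 0 then out ++ ["- " ++ label ++ ": ... and " ++ PySem.Int.toStr remaining ++ " more"]
    else out

def summarize_workspace_delta_py_alt (before : List (String × Int × Int)) (after : List (String × Int × Int)) (max_items_per_group : Int) : String :=
  let bs := PySem.List.sorted (PySem.Dict.ofList before).items (fun kv => kv.1) false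
  let asr := PySem.List.sorted (PySem.Dict.ofList after).items (fun kv => kv.1) false
  let cud := pvMerge bs asr
  if cud.1.isEmpty && cud.2.1.isEmpty && cud.2.2.isEmpty then "No workspace file changes detected."
  else
    let lines : List String :=
      ["✅ Workspace changes detected:",
       "- Created: " ++ PySem.Int.toStr (cud.1.length : Int),
       "- Updated: " ++ PySem.Int.toStr (cud.2.1.length : Int),
       "- Deleted: " ++ PySem.Int.toStr (cud.2.2.length : Int)]
    PySem.Str.join "\n" (lines ++ pvGroupLines "Created" cud.1 max_items_per_group
      ++ pvGroupLines "Updated" cud.2.1 max_items_per_group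
      ++ pvGroupLines "Deleted" cud.2.2 max_items_per_group)

-- ===== PRECONDITION & SPEC =====
def Spec_summarize_workspace_delta_py (before : List (String × Int × Int)) (after : List (String × Int × Int)) (max_items_per_group : Int) (out : String) : Prop := out = summarize_workspace_delta_py_alt before after max_items_per_group
instance (before : List (String × Int × Int)) (after : List (String × Int × Int)) (max_items_per_group : Int) (out : String) : Decidable (Spec_summarize_workspace_delta_py before after max_items_per_group out) := by unfold Spec_summarize_workspace_delta_py; infer_instance

-- ===== CLAIM (what is proved, stated in full; the proofs are below) =====
def Claim_equal_summarize_workspace_delta_py : Prop := ∀ (before : List (String × Int × Int)) (after : List (String × Int × Int)) (max_items_per_group : Int), Dom_summarize_workspace_delta_py before after max_items_per_group → Spec_summarize_workspace_delta_py before after max_items_per_group (summarize_workspace_delta_py before after max_items_per_group)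

-- ===== LEMMAS AND PROOFS =====

-- A's per-group append-in-place formatting is lines ++ B's helper's result
theorem pvFmtGroup_eq (label : String) (items : List String) (m : Int) (lines : List String) :
    pvFmtGroup label items m lines = lines ++ pvGroupLines label items m := by
  unfold pvFmtGroup pvGroupLines
  by_cases h : items = [] <;> simp [h] <;> split <;> simp

-- the merge of two key-sorted nodup-key item lists classifies by filters
-- lookup misses exactly the absent keys; on nodup keys it returns the paired value
theorem pv_lookup_eq_none (l : List (String × Int × Int)) (k : String)
    (h : k ∉ l.map (fun p => p.1)) : List.lookup k l = none := by
  induction l with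
  | nil => rfl
  | cons a t ih =>
    simp only [List.map_cons, List.mem_cons, not_or] at h
    have : (k == a.1) = false := by simp [h.1]
    simp [List.lookup, this, ih h.2]

theorem pv_lookup_of_mem (l : List (String × Int × Int)) (k : String) (v : Int × Int)
    (hnd : (l.map (fun p => p.1)).Nodup) (hm : (k, v) ∈ l) : List.lookup k l = some v := by
  induction l with
  | nil => simp at hm
  | cons a t ih =>
    simp only [List.map_cons, List.nodup_cons] at hnd
    rcases List.mem_cons.1 hm with rfl | hm
    · simp [List.lookup]
    · have : (k == a.1) = false := by
        have : k ∈ t.map (fun p => p.1) := List.mem_map.2 ⟨(k, v), hm, rfl⟩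
        simp only [beq_eq_false_iff_ne, ne_eq]
        intro hk; exact hnd.1 (hk ▸ this)
      simp [List.lookup, this, ih hnd.2 hm]

theorem pvMerge_eq (bs asr : List (String × Int × Int))
    (hb : (bs.map (fun p => p.1)).Pairwise (· < ·))
    (ha : (asr.map (fun p => p.1)).Pairwise (· < ·)) :
    pvMerge bs asr =
      ((asr.filter (fun p => !decide (p.1 ∈ bs.map (fun q => q.1)))).map (fun p => p.1),
       (asr.filter (fun p => Option.any (fun v => v != p.2) (List.lookup p.1 bs))).map (fun p => p.1),
       (bs.filter (fun p => !decide (p.1 ∈ asr.map (fun q => q.1)))).map (fun p => p.1)) := by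
  fun_induction pvMerge bs asr with
  | case1 asr => simp [List.lookup]
  | case2 kb vb bs => simp
  | case3 kb vb bs ka va asr h r ih =>
    -- deleted-head branch: kb < ka, so kb is smaller than every key of the after list
    have hb' := (List.pairwise_cons.1 hb).2
    have hka : ∀ p ∈ (ka, va) :: asr, kb < p.1 := by
      intro p hp
      rcases List.mem_cons.1 hp with rfl | hp
      · exact h
      · exact lt_trans h ((List.pairwise_cons.1 ha).1 p.1 (List.mem_map.2 ⟨p, hp, rfl⟩))
    have hr : r = pvMerge bs ((ka, va) :: asr) := rfl
    rw [hr, ih hb' ha]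
    refine Prod.ext ?_ (Prod.ext ?_ ?_)
    · simp only
      congr 1
      apply List.filter_congr
      intro p hp
      have : p.1 ≠ kb := ne_of_gt (hka p hp)
      simp [this]
    · simp only
      congr 1
      apply List.filter_congr
      intro p hp
      have : (p.1 == kb) = false := by simp [ne_of_gt (hka p hp)]
      simp [List.lookup, this]
    · simp only [List.filter_cons]
      have : kb ∉ ((ka, va) :: asr).map (fun q => q.1) := by
        intro hmem
        obtain ⟨p, hp, hq⟩ := List.mem_map.1 hmem
        exact absurd (hq ▸ hka p hp) (lt_irrefl _)
      simp only [List.map_cons] at this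
      simp [this]
  | case4 kb vb bs ka va asr h1 h2 r ih =>
    -- created-head branch: ka < kb, so ka is smaller than every key of the before list
    have ha' := (List.pairwise_cons.1 ha).2
    have hkb : ∀ p ∈ (kb, vb) :: bs, ka < p.1 := by
      intro p hp
      rcases List.mem_cons.1 hp with rfl | hp
      · exact h2
      · exact lt_trans h2 ((List.pairwise_cons.1 hb).1 p.1 (List.mem_map.2 ⟨p, hp, rfl⟩))
    have hr : r = pvMerge ((kb, vb) :: bs) asr := rfl
    rw [hr, ih hb ha']
    refine Prod.ext ?_ (Prod.ext ?_ ?_)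
    · simp only [List.filter_cons]
      have : ka ∉ ((kb, vb) :: bs).map (fun q => q.1) := by
        intro hmem
        obtain ⟨p, hp, hq⟩ := List.mem_map.1 hmem
        exact absurd (hq ▸ hkb p hp) (lt_irrefl _)
      simp only [List.map_cons] at this
      simp [this]
    · simp only [List.filter_cons]
      have hlk : List.lookup ka ((kb, vb) :: bs) = none := by
        apply pv_lookup_eq_none
        intro hmem
        obtain ⟨p, hp, hq⟩ := List.mem_map.1 hmem
        exact absurd (hq ▸ hkb p hp) (lt_irrefl _)
      simp [hlk]
    · simp only
      congr 1
      apply List.filter_congr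
      intro p hp
      have : p.1 ≠ ka := ne_of_gt (hkb p hp)
      simp [this]
  | case5 kb vb bs ka va asr h1 h2 r ih =>
    -- match branch: keys equal
    have hkeq : kb = ka := le_antisymm (le_of_not_gt h2) (le_of_not_gt h1)
    subst hkeq
    have hb' := (List.pairwise_cons.1 hb).2
    have ha' := (List.pairwise_cons.1 ha).2
    have hbgt : ∀ p ∈ bs, kb < p.1 := fun p hp => (List.pairwise_cons.1 hb).1 p.1 (List.mem_map.2 ⟨p, hp, rfl⟩)
    have hagt : ∀ p ∈ asr, kb < p.1 := fun p hp => (List.pairwise_cons.1 ha).1 p.1 (List.mem_map.2 ⟨p, hp, rfl⟩)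
    have hr : r = pvMerge bs asr := rfl
    rw [hr, ih hb' ha']
    refine Prod.ext ?_ (Prod.ext ?_ ?_)
    · simp only [List.filter_cons]
      have hhead : (kb ∈ ((kb, vb) :: bs).map (fun q => q.1)) := by simp
      simp only [hhead, decide_true, Bool.not_true]
      congr 1
      apply List.filter_congr
      intro p hp
      have : p.1 ≠ kb := ne_of_gt (hagt p hp)
      simp [this]
    · simp only [List.filter_cons]
      have hlk : List.lookup kb ((kb, vb) :: bs) = some vb := by simp [List.lookup]
      simp only [hlk]
      have htail : List.filter (fun p => Option.any (fun v => v != p.2) (List.lookup p.1 ((kb, vb) :: bs))) asr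
          = List.filter (fun p => Option.any (fun v => v != p.2) (List.lookup p.1 bs)) asr := by
        apply List.filter_congr
        intro p hp
        have : (p.1 == kb) = false := by simp [ne_of_gt (hagt p hp)]
        simp [List.lookup, this]
      have hcond : (Option.any (fun v => v != va) (some vb)) = (vb != va) := rfl
      rw [hcond, htail]
      by_cases hv : vb = va
      · simp [hv]
      · have hbne : (vb != va) = true := by simp [hv]
        simp [hbne]
    · simp only [List.filter_cons]
      have hhead : (kb ∈ ((kb, va) :: asr).map (fun q => q.1)) := by simp
      simp only [hhead, decide_true, Bool.not_true]
      congr 1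
      apply List.filter_congr
      intro p hp
      have : p.1 ≠ kb := ne_of_gt (hbgt p hp)
      simp [this]

-- sorting a nodup list equals any strictly increasing list with the same members
theorem pv_sorted_eq_filter (xs ys : List String)
    (hys : ys.Pairwise (· < ·)) (hxs : xs.Nodup) (hm : ∀ x, x ∈ xs ↔ x ∈ ys) :
    PySem.List.sorted xs (fun x => x) false = ys := by
  apply PySem.List.sorted_eq_of_perm_of_pairwise_lt
  · have hynd : ys.Nodup := hys.imp (fun h => ne_of_lt h)
    exact (List.perm_ext_iff_of_nodup hynd hxs).2 (fun x => ((hm x).symm))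
  · exact hys

-- ===== VERDICT (by name: the statement is the Claim_ definition above) =====
theorem summarize_workspace_delta_py_spec : Claim_equal_summarize_workspace_delta_py := by
  intro before after m _
  unfold Spec_summarize_workspace_delta_py
  simp only [summarize_workspace_delta_py, summarize_workspace_delta_py_alt]
  set b := PySem.Dict.ofList before with hbdef
  set a := PySem.Dict.ofList after with hadef
  set bs := PySem.List.sorted b.items (fun kv => kv.1) false with hbs
  set asr := PySem.List.sorted a.items (fun kv => kv.1) false with has
  have hbnd : b.keys.Nodup := PySem.Dict.nodup_keys_ofList before
  have hand : a.keys.Nodup := PySem.Dict.nodup_keys_ofList after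
  have hbperm : bs.Perm b.items := PySem.List.sorted_perm b.items (fun kv => kv.1) false
  have haperm : asr.Perm a.items := PySem.List.sorted_perm a.items (fun kv => kv.1) false
  have hbkperm : (bs.map (fun p => p.1)).Perm b.keys := hbperm.map _
  have hakperm : (asr.map (fun p => p.1)).Perm a.keys := haperm.map _
  have hbknd : (bs.map (fun p => p.1)).Nodup := hbkperm.nodup_iff.2 hbnd
  have haknd : (asr.map (fun p => p.1)).Nodup := hakperm.nodup_iff.2 hand
  have hblt : (bs.map (fun p => p.1)).Pairwise (· < ·) :=
    ((PySem.List.sorted_map_key_pairwise b.items (fun kv => kv.1)).and hbknd).imp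
      (fun h => lt_of_le_of_ne h.1 h.2)
  have halt : (asr.map (fun p => p.1)).Pairwise (· < ·) :=
    ((PySem.List.sorted_map_key_pairwise a.items (fun kv => kv.1)).and haknd).imp
      (fun h => lt_of_le_of_ne h.1 h.2)
  have hbmem : ∀ k, k ∈ bs.map (fun p => p.1) ↔ k ∈ b.keys := fun k => hbkperm.mem_iff
  have hamem : ∀ k, k ∈ asr.map (fun p => p.1) ↔ k ∈ a.keys := fun k => hakperm.mem_iff
  have hexa : ∀ x, (∃ p, p ∈ asr ∧ p.1 = x) ↔ x ∈ a.keys := by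
    intro x; rw [← hamem x]; simp [List.mem_map]
  have hexb : ∀ x, (∃ p, p ∈ bs ∧ p.1 = x) ↔ x ∈ b.keys := by
    intro x; rw [← hbmem x]; simp [List.mem_map]
  have hlook : ∀ k, List.lookup k bs = b.get? k := by
    intro k
    cases h : b.get? k with
    | none =>
      apply pv_lookup_eq_none
      rw [hbmem k]
      exact (PySem.Dict.get?_eq_none_iff_not_mem_keys b k).1 h
    | some v =>
      exact pv_lookup_of_mem bs k v hbknd
        (hbperm.mem_iff.2 (PySem.Dict.mem_items_of_get?_eq_some b h))
  have hitem : ∀ k v, (k, v) ∈ asr ↔ a.get? k = some v := by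
    intro k v
    rw [haperm.mem_iff]
    exact (PySem.Dict.get?_eq_some_iff_mem_items a k v hand).symm
  rw [pvMerge_eq bs asr hblt halt]
  have hcreated :
      PySem.List.sorted (PySem.Set.diff (PySem.Set.ofList a.keys) (PySem.Set.ofList b.keys)) (fun x => x) false
        = (asr.filter (fun p => !decide (p.1 ∈ bs.map (fun q => q.1)))).map (fun p => p.1) := by
    apply pv_sorted_eq_filter
    · exact List.Pairwise.sublist (List.filter_sublist.map _) halt
    · exact PySem.Set.nodup_diff _ _ (PySem.Set.nodup_ofList _)
    · intro x
      simp only [PySem.Set.mem_diff, PySem.Set.mem_ofList, List.mem_map, List.mem_filter,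
        Bool.not_eq_eq_eq_not, Bool.not_true, decide_eq_false_iff_not]
      constructor
      · rintro ⟨hxa, hxb⟩
        obtain ⟨p, hp, rfl⟩ := (hexa x).2 hxa
        exact ⟨p, ⟨hp, fun hc => hxb ((hexb p.1).1 hc)⟩, rfl⟩
      · rintro ⟨p, ⟨hp, hnb⟩, rfl⟩
        exact ⟨(hexa p.1).1 ⟨p, hp, rfl⟩, fun h => hnb ((hexb p.1).2 h)⟩
  have hdeleted :
      PySem.List.sorted (PySem.Set.diff (PySem.Set.ofList b.keys) (PySem.Set.ofList a.keys)) (fun x => x) false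
        = (bs.filter (fun p => !decide (p.1 ∈ asr.map (fun q => q.1)))).map (fun p => p.1) := by
    apply pv_sorted_eq_filter
    · exact List.Pairwise.sublist (List.filter_sublist.map _) hblt
    · exact PySem.Set.nodup_diff _ _ (PySem.Set.nodup_ofList _)
    · intro x
      simp only [PySem.Set.mem_diff, PySem.Set.mem_ofList, List.mem_map, List.mem_filter,
        Bool.not_eq_eq_eq_not, Bool.not_true, decide_eq_false_iff_not]
      constructor
      · rintro ⟨hxb, hxa⟩
        obtain ⟨p, hp, rfl⟩ := (hexb x).2 hxb
        exact ⟨p, ⟨hp, fun hc => hxa ((hexa p.1).1 hc)⟩, rfl⟩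
      · rintro ⟨p, ⟨hp, hna⟩, rfl⟩
        exact ⟨(hexb p.1).1 ⟨p, hp, rfl⟩, fun h => hna ((hexa p.1).2 h)⟩
  have hupdated :
      PySem.List.sorted
        ((PySem.Set.inter (PySem.Set.ofList b.keys) (PySem.Set.ofList a.keys)).filter
          (fun path => b.get? path != a.get? path)) (fun x => x) false
        = (asr.filter (fun p => Option.any (fun v => v != p.2) (List.lookup p.1 bs))).map (fun p => p.1) := by
    apply pv_sorted_eq_filter
    · exact List.Pairwise.sublist (List.filter_sublist.map _) halt
    · exact (PySem.Set.nodup_inter _ _ (PySem.Set.nodup_ofList _)).filter _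
    · intro x
      simp only [List.mem_filter, PySem.Set.mem_inter, PySem.Set.mem_ofList, List.mem_map]
      constructor
      · rintro ⟨⟨hxb, hxa⟩, hne⟩
        obtain ⟨w, hw⟩ : ∃ w, b.get? x = some w := by
          cases h : b.get? x with
          | none => exact absurd ((PySem.Dict.get?_eq_none_iff_not_mem_keys b x).1 h) (not_not_intro hxb)
          | some w => exact ⟨w, rfl⟩
        obtain ⟨v, hv⟩ : ∃ v, a.get? x = some v := by
          cases h : a.get? x with
          | none => exact absurd ((PySem.Dict.get?_eq_none_iff_not_mem_keys a x).1 h) (not_not_intro hxa)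
          | some v => exact ⟨v, rfl⟩
        refine ⟨(x, v), ⟨(hitem x v).2 hv, ?_⟩, rfl⟩
        rw [hlook, hw]
        have hwv : w ≠ v := by
          rw [hw, hv] at hne
          simpa using hne
        simpa using hwv
      · rintro ⟨p, ⟨hp, hcond⟩, rfl⟩
        have hav : a.get? p.1 = some p.2 := (hitem p.1 p.2).1 (by rwa [Prod.mk.eta])
        rw [hlook] at hcond
        cases hbx : b.get? p.1 with
        | none => rw [hbx] at hcond; simp [Option.any] at hcond
        | some w =>
          rw [hbx] at hcond
          have hwne : w ≠ p.2 := by simpa using hcond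
          refine ⟨⟨?_, ?_⟩, ?_⟩
          · by_contra hnk
            rw [(PySem.Dict.get?_eq_none_iff_not_mem_keys b p.1).2 hnk] at hbx
            cases hbx
          · by_contra hnk
            rw [(PySem.Dict.get?_eq_none_iff_not_mem_keys a p.1).2 hnk] at hav
            cases hav
          · rw [hav]
            simpa using hwne
  rw [hcreated, hdeleted, hupdated]
  set C := (asr.filter (fun p => !decide (p.1 ∈ bs.map (fun q => q.1)))).map (fun p => p.1) with hC
  set U := (asr.filter (fun p => Option.any (fun v => v != p.2) (List.lookup p.1 bs))).map (fun p => p.1) with hU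
  set D := (bs.filter (fun p => !decide (p.1 ∈ asr.map (fun q => q.1)))).map (fun p => p.1) with hD
  have hcond : (C.length + U.length + D.length = 0) ↔ (C.isEmpty && U.isEmpty && D.isEmpty) = true := by
    simp [List.isEmpty_iff, List.length_eq_zero_iff]
  by_cases h : C.length + U.length + D.length = 0
  · rw [if_pos h, if_pos (hcond.1 h)]
  · rw [if_neg h, if_neg (fun hc => h (hcond.2 hc))]
    simp only [pvFmtGroup_eq, List.append_assoc]
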